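-- pv_equiv track=rewrite | github.com/kylebebak/python_algorithms | custom/geohash.py | _neighbor_prev
-- ===== SOURCE A (Python) =====
-- def _neighbor_prev(gh):
--     GH = list(gh)
--     for i in range(len(GH)-1, -1, -1):
--         if GH[i] == '0':
--             GH[i] = '1'
--         else:
--             GH[i] = '0'
--             break
--     return GH
-- ===== SOURCE B (Python) =====
-- def _neighbor_prev(gh):
--     # Index of the last non-'0' character; -1 if there is none (or gh is empty).
--     k = len(gh.rstrip('0')) - 1
--     if k < 0:
--         return ['1'] * len(gh)
--     return list(gh[:k]) + ['0'] + ['1'] * (len(gh) - k - 1)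
-- ===== Notes on version B (the rewrite author's own statement) =====
-- stated objective: simpler
-- what changed: A scans right-to-left flipping '0'->'1' until it can flip a non-'0' to '0' and break; B instead locates the last non-'0' character once via rstrip('0') and assembles the result as prefix + ['0'] + trailing ['1']s (all '1's if none), with no scan-and-mutate loop.
import Mathlib
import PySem

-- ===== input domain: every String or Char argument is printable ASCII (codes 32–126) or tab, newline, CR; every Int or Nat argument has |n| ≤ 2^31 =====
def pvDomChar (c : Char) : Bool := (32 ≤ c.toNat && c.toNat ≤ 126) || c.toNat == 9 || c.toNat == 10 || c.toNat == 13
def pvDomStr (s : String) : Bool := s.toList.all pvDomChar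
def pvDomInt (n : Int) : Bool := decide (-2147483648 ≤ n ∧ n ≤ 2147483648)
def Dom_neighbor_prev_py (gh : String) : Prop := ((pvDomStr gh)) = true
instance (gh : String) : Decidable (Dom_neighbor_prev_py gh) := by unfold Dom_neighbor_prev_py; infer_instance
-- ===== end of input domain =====

-- B replaces A's right-to-left scan-and-flip loop by locating the last non-'0' character once
-- (rstrip) and assembling the answer as prefix ++ ['0'] ++ trailing '1's (objective: simpler).

-- the single-character strings that list(gh) produces (used by both ports)
def pvMk1 (c : Char) : String := String.ofList [c]

-- ===== PORT A =====
-- the for-loop over descending indices, with its break: recursion over the index list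
def pvNbLoopA : List Int → List String → List String
  | [], GH => GH
  | i :: rest, GH =>
    if PySem.List.pyGetD GH i "" == "0" then
      pvNbLoopA rest (PySem.List.pySetD GH i "1")
    else
      PySem.List.pySetD GH i "0"

def neighbor_prev_py (gh : String) : List String :=
  let GH := gh.toList.map pvMk1
  pvNbLoopA (PySem.List.pyRange ((GH.length : Int) - 1) (-1) (-1)) GH

-- ===== PORT B =====
-- gh.rstrip('0') has no PySem primitive; its LENGTH is ported by hand as
-- (dropWhile (== '0') ∘ reverse).length — exact: rstrip('0') drops exactly the trailing '0' chars.
def neighbor_prev_py_alt (gh : String) : List String :=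
  let cs := gh.toList
  let k : Int := ((cs.reverse.dropWhile (fun c => c == '0')).length : Int) - 1
  if k < 0 then
    List.replicate cs.length "1"
  else
    (cs.take k.toNat).map pvMk1 ++ ["0"] ++ List.replicate (cs.length - k.toNat - 1) "1"

-- ===== PRECONDITION & SPEC =====
def Spec_neighbor_prev_py (gh : String) (out : List String) : Prop := out = neighbor_prev_py_alt gh
instance (gh : String) (out : List String) : Decidable (Spec_neighbor_prev_py gh out) := by unfold Spec_neighbor_prev_py; infer_instance

-- ===== CLAIM (what is proved, stated in full; the proofs are below) =====
def Claim_equal_neighbor_prev_py : Prop := ∀ (gh : String), Dom_neighbor_prev_py gh → Spec_neighbor_prev_py gh (neighbor_prev_py gh)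

-- ===== LEMMAS AND PROOFS =====

-- common characterization of both results, on the REVERSED char list
def pvH : List Char → List String
  | [] => []
  | c :: r => if c = '0' then "1" :: pvH r else "0" :: r.map pvMk1

lemma pvMk1_beq (c : Char) : (pvMk1 c == "0") = (c == '0') := by
  by_cases h : c = '0'
  · subst h; rfl
  · have h1 : pvMk1 c ≠ "0" := fun hh => h (by simpa [pvMk1] using congrArg String.toList hh)
    rw [Bool.eq_iff_iff]
    simp [h1, h]

-- frame: the loop over in-range indices of the front part never touches the tail
lemma pvNbLoopA_append (idxs : List Int) (front tail : List String)
    (h : ∀ i ∈ idxs, 0 ≤ i ∧ i < (front.length : Int)) :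
    pvNbLoopA idxs (front ++ tail) = pvNbLoopA idxs front ++ tail := by
  induction idxs generalizing front with
  | nil => rfl
  | cons i rest ih =>
    obtain ⟨h0, h1⟩ := h i (List.mem_cons_self ..)
    have hi2 : i < ((front ++ tail).length : Int) := by
      rw [List.length_append]; push_cast; omega
    have hget : PySem.List.pyGetD (front ++ tail) i "" = PySem.List.pyGetD front i "" := by
      rw [PySem.List.pyGetD_eq_getElem _ _ h0 hi2, PySem.List.pyGetD_eq_getElem _ _ h0 h1]
      have hlt : i.toNat < front.length := by omega
      simp [hlt]
    have hset : ∀ v, PySem.List.pySetD (front ++ tail) i v = PySem.List.pySetD front i v ++ tail := by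
      intro v
      rw [PySem.List.pySetD_of_nonneg _ _ h0, PySem.List.pySetD_of_nonneg _ _ h0, List.set_append]
      have hlt : i.toNat < front.length := by omega
      simp [hlt]
    simp only [pvNbLoopA, hget, hset]
    by_cases hb : PySem.List.pyGetD front i "" == "0"
    · rw [if_pos hb, if_pos hb]
      apply ih
      intro j hj
      have hhj := h j (List.mem_cons_of_mem _ hj)
      rw [PySem.List.pySetD_of_nonneg _ _ h0, List.length_set]
      exact hhj
    · rw [if_neg hb, if_neg hb]

lemma pvA_char (cs : List Char) :
    pvNbLoopA (PySem.List.pyRange ((cs.length : Int) - 1) (-1) (-1)) (cs.map pvMk1)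
      = (pvH cs.reverse).reverse := by
  induction cs using List.reverseRecOn with
  | nil => rfl
  | append_singleton front c ih =>
    have hlen : (((front ++ [c]).length : Int) - 1) = (front.length : Int) := by
      rw [List.length_append]; push_cast; simp
    rw [List.map_append, hlen,
        PySem.List.pyRange_neg_one_cons (by omega : (-1:Int) < (front.length : Int))]
    simp only [List.map_cons, List.map_nil]
    have hget : PySem.List.pyGetD (front.map pvMk1 ++ [pvMk1 c]) ((front.length : Int)) "" = pvMk1 c := by
      rw [PySem.List.pyGetD_natCast]
      simp [List.getD]
    have hset : ∀ v, PySem.List.pySetD (front.map pvMk1 ++ [pvMk1 c]) ((front.length : Int)) v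
        = front.map pvMk1 ++ [v] := by
      intro v
      rw [PySem.List.pySetD_natCast, List.set_append]
      simp
    simp only [pvNbLoopA, hget, hset]
    by_cases hc : c = '0'
    · subst hc
      rw [if_pos (by rw [pvMk1_beq]; rfl)]
      rw [pvNbLoopA_append _ (front.map pvMk1) ["1"] (by
        intro j hj
        rw [PySem.List.mem_pyRange_neg_one] at hj
        refine ⟨by omega, ?_⟩
        rw [List.length_map]; omega)]
      rw [ih]
      simp [pvH, List.reverse_append]
    · rw [if_neg (by rw [pvMk1_beq]; simp [hc])]
      simp [pvH, hc, List.reverse_append, List.map_reverse]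

lemma pvB_char (r : List Char) :
    (if (((r.dropWhile (fun c => c == '0')).length : Int) - 1) < 0 then
       List.replicate r.length "1"
     else
       (r.reverse.take ((((r.dropWhile (fun c => c == '0')).length : Int) - 1)).toNat).map pvMk1
         ++ ["0"]
         ++ List.replicate (r.length - ((((r.dropWhile (fun c => c == '0')).length : Int) - 1)).toNat - 1) "1")
    = (pvH r).reverse := by
  induction r with
  | nil => rfl
  | cons c r' ih =>
    by_cases hc : c = '0'
    · subst hc
      rw [List.dropWhile_cons_of_pos (by rfl)]
      rw [show pvH ('0' :: r') = "1" :: pvH r' from by simp [pvH]]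
      rw [show ("1" :: pvH r').reverse = (pvH r').reverse ++ ["1"] from by rw [List.reverse_cons], ← ih]
      by_cases hD : (r'.dropWhile (fun c => c == '0')).length = 0
      · rw [if_pos (by omega), if_pos (by omega)]
        rw [List.length_cons, List.replicate_succ']
      · have hDle := List.length_dropWhile_le (fun c => (c == '0')) r'
        rw [if_neg (by omega), if_neg (by omega)]
        have ht : ((((r'.dropWhile (fun c => c == '0')).length : Int) - 1)).toNat
            = (r'.dropWhile (fun c => c == '0')).length - 1 := by omega
        rw [ht, List.reverse_cons, List.take_append_of_le_length (by
          rw [List.length_reverse]; omega)]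
        rw [List.length_cons,
            show r'.length + 1 - ((r'.dropWhile (fun c => c == '0')).length - 1) - 1
              = (r'.length - ((r'.dropWhile (fun c => c == '0')).length - 1) - 1) + 1 from by omega,
            List.replicate_succ']
        simp [List.append_assoc]
    · rw [List.dropWhile_cons_of_neg (by simp [hc])]
      rw [if_neg (by rw [List.length_cons]; push_cast; omega)]
      have ht : ((((c :: r').length : Int) - 1)).toNat = r'.length := by
        rw [List.length_cons]; omega
      rw [ht, List.reverse_cons, List.take_append_of_le_length (by simp)]
      have htl : r'.reverse.take r'.length = r'.reverse := by simp
      rw [htl, List.length_cons,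
          show r'.length + 1 - r'.length - 1 = 0 from by omega, List.replicate_zero]
      simp [pvH, hc, List.map_reverse]

-- ===== VERDICT (by name: the statement is the Claim_ definition above) =====
theorem neighbor_prev_py_spec : Claim_equal_neighbor_prev_py := by
  intro gh _
  unfold Spec_neighbor_prev_py neighbor_prev_py neighbor_prev_py_alt
  have hA := pvA_char gh.toList
  have hB := pvB_char gh.toList.reverse
  simp only [List.reverse_reverse, List.length_reverse] at hB
  simp only [List.length_map]
  rw [hA, ← hB]
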